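-- pv_equiv track=rewrite | github.com/dheerajsharma2399/telegram-automate | enhanced_email_generator.py | format_projects_section
-- ===== SOURCE A (Python) =====
-- from typing import Dict, List, Tuple, Optional
--
-- def format_projects_section(projects: List[Dict]) -> str:
--     """Format projects section for email"""
--     if not projects:
--         return ""
--
--     project_texts = []
--     for project in projects:
--         name = project.get('name', '')
--         description = project.get('description', '')
--
--         # Shorten description if too long
--         if len(description) > 150:
--             description = description[:147] + "..."
--
--         project_texts.append(f"**{name}**: {description}")
--
--     if len(project_texts) == 1:
--         return f"Some of my relevant work includes {project_texts[0].lower()}."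
--     elif len(project_texts) == 2:
--         return f"Some of my relevant work includes {project_texts[0].lower()} and {project_texts[1].lower()}."
--     else:
--         return f"Some of my relevant work includes {project_texts[0].lower()}, {project_texts[1].lower()}, and {project_texts[2].lower()}."
-- ===== SOURCE B (Python) =====
-- def format_projects_section(projects):
--     """Single accumulator pass over at most the first three projects: lowercase the
--     fields up front, pick each item's separator from its position, append as we go."""
--     if not projects:
--         return ""
--     n = len(projects)
--     last = min(n, 3) - 1
--     out = ""
--     for i, project in enumerate(projects):
--         if i == 3:
--             break
--         name = project.get('name', '').lower()
--         desc = project.get('description', '').lower()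
--         if len(desc) > 150:
--             desc = desc[:147] + "..."
--         if i == 0:
--             sep = ""
--         elif i < last:
--             sep = ", "
--         else:
--             sep = " and " if n == 2 else ", and "
--         out += sep + f"**{name}**: {desc}"
--     return f"Some of my relevant work includes {out}."
-- ===== Notes on version B (the rewrite author's own statement) =====
-- stated objective: alternative
-- what changed: B is a single accumulator pass over at most the first three projects that lowercases the name/description fields before formatting and picks each item's separator from its position (first / middle / last, with the two-item conjunction special-cased), replacing A's format-everything pass followed by three hand-written whole-sentence branches on the count.
import Mathlib
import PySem

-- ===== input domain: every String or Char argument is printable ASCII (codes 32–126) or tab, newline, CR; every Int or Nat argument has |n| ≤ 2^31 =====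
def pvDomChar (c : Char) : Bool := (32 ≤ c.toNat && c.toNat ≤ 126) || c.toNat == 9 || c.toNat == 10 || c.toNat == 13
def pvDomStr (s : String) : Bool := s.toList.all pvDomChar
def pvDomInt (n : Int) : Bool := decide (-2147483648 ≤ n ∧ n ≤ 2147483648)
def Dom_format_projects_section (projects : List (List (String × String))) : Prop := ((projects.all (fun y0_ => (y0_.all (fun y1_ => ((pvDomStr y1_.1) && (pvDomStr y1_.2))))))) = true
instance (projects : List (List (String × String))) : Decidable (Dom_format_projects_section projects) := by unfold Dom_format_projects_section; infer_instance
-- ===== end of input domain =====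

-- B replaces A's format-everything pass plus three whole-sentence count branches by one
-- accumulator pass over the first ≤3 projects with position-chosen separators (alternative
-- decomposition, not claimed faster).

-- ===== PORT A =====
-- A: format every project, then branch on the count (1 / 2 / else) with hand-written sentences.
def pvFmtA (p : List (String × String)) : List Char :=
  let name := (PySem.Dict.getD (PySem.Dict.mk p) "name" "").toList
  let desc := (PySem.Dict.getD (PySem.Dict.mk p) "description" "").toList
  let desc := if 150 < desc.length then PySem.List.slice desc none (some 147) ++ "...".toList else desc
  "**".toList ++ name ++ "**: ".toList ++ desc

def format_projects_section (projects : List (List (String × String))) : String :=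
  if projects = [] then "" else
  let texts := projects.foldl (fun acc p => acc ++ [pvFmtA p]) []
  if texts.length = 1 then
    String.ofList ("Some of my relevant work includes ".toList ++
      PySem.Chars.lower (PySem.List.pyGetD texts 0 []) ++ ".".toList)
  else if texts.length = 2 then
    String.ofList ("Some of my relevant work includes ".toList ++
      PySem.Chars.lower (PySem.List.pyGetD texts 0 []) ++ " and ".toList ++
      PySem.Chars.lower (PySem.List.pyGetD texts 1 []) ++ ".".toList)
  else
    String.ofList ("Some of my relevant work includes ".toList ++
      PySem.Chars.lower (PySem.List.pyGetD texts 0 []) ++ ", ".toList ++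
      PySem.Chars.lower (PySem.List.pyGetD texts 1 []) ++ ", and ".toList ++
      PySem.Chars.lower (PySem.List.pyGetD texts 2 []) ++ ".".toList)

-- ===== PORT B =====
-- B: one pass with index i over the projects, breaking at i = 3; fields lowercased first,
-- separator chosen from the position (first / middle / last-of-the-shown, n = 2 special-cased).
def pvSepB (n : Nat) (last : Nat) (i : Nat) : List Char :=
  if i = 0 then []
  else if i < last then ", ".toList
  else if n = 2 then " and ".toList else ", and ".toList

def pvGoB (n : Nat) (last : Nat) : Nat → List (List (String × String)) → List Char
  | _, [] => []
  | i, p :: rest =>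
    if i = 3 then [] else
    let name := PySem.Chars.lower (PySem.Dict.getD (PySem.Dict.mk p) "name" "").toList
    let desc := PySem.Chars.lower (PySem.Dict.getD (PySem.Dict.mk p) "description" "").toList
    let desc := if 150 < desc.length then PySem.List.slice desc none (some 147) ++ "...".toList else desc
    pvSepB n last i ++ "**".toList ++ name ++ "**: ".toList ++ desc ++ pvGoB n last (i + 1) rest

def format_projects_section_alt (projects : List (List (String × String))) : String :=
  if projects = [] then "" else
  let n := projects.length
  let last := min n 3 - 1
  String.ofList ("Some of my relevant work includes ".toList ++ pvGoB n last 0 projects ++ ".".toList)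

-- ===== PRECONDITION & SPEC =====
def Spec_format_projects_section (projects : List (List (String × String))) (out : String) : Prop := out = format_projects_section_alt projects
instance (projects : List (List (String × String))) (out : String) : Decidable (Spec_format_projects_section projects out) := by unfold Spec_format_projects_section; infer_instance

-- ===== CLAIM (what is proved, stated in full; the proofs are below) =====
def Claim_equal_format_projects_section : Prop := ∀ (projects : List (List (String × String))), Dom_format_projects_section projects → Spec_format_projects_section projects (format_projects_section projects)

-- ===== LEMMAS AND PROOFS =====
-- lowercasing A's formatted item = B's item built from lowercased fields
theorem lower_pvFmtA (p : List (String × String)) :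
    PySem.Chars.lower (pvFmtA p) =
      "**".toList ++ PySem.Chars.lower (PySem.Dict.getD (PySem.Dict.mk p) "name" "").toList ++
      "**: ".toList ++
      (if 150 < (PySem.Chars.lower (PySem.Dict.getD (PySem.Dict.mk p) "description" "").toList).length then
        PySem.List.slice (PySem.Chars.lower (PySem.Dict.getD (PySem.Dict.mk p) "description" "").toList)
          none (some 147) ++ "...".toList
       else PySem.Chars.lower (PySem.Dict.getD (PySem.Dict.mk p) "description" "").toList) := by
  simp only [pvFmtA, PySem.Chars.lower, List.map_append, List.length_map,
    PySem.List.slice_to _ (by norm_num : (0 : Int) ≤ 147), ← List.map_take]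
  split_ifs with h <;> simp <;> decide

theorem pvGoB_stop (n last : Nat) (rest : List (List (String × String))) :
    pvGoB n last 3 rest = [] := by
  cases rest <;> simp [pvGoB]

-- ===== VERDICT (by name: the statement is the Claim_ definition above) =====
theorem format_projects_section_spec : Claim_equal_format_projects_section := by
  intro projects _
  unfold Spec_format_projects_section format_projects_section format_projects_section_alt
  rw [PySem.List.foldl_append_singleton_eq_map]
  match projects with
  | [] => rfl
  | [a] =>
    norm_num [pvGoB, pvSepB, lower_pvFmtA, PySem.List.pyGetD_ofNat']
  | [a, b] =>
    norm_num [pvGoB, pvSepB, lower_pvFmtA, PySem.List.pyGetD_ofNat', List.append_assoc]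
  | a :: b :: c :: rest =>
    have hne : ¬ (rest.length + 1 + 1 + 1 = 2) := by omega
    have hmin : min (rest.length + 1 + 1 + 1) 3 - 1 = 2 := by omega
    norm_num [pvGoB, pvSepB, pvGoB_stop, lower_pvFmtA, PySem.List.pyGetD_ofNat', hne, hmin,
      List.append_assoc]
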